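-- pv_equiv track=rewrite | github.com/staboss/home-assistant | custom_components/yandex_smart_home/capability_color.py | get_supported_scenes
-- ===== SOURCE A (Python) =====
-- def get_supported_scenes(scenes_map: dict[str, list[str]],
--                          entity_effect_list: list[str]) -> list[str]:
--     yandex_scenes = set()
--     for effect in entity_effect_list:
--         for yandex_scene, ha_effects in scenes_map.items():
--             if effect in ha_effects:
--                 yandex_scenes.add(yandex_scene)
--
--     return sorted(list(yandex_scenes))
-- ===== SOURCE B (Python) =====
-- def get_supported_scenes(scenes_map: dict[str, list[str]],
--                          entity_effect_list: list[str]) -> list[str]: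
--     effects = set(entity_effect_list)
--     return sorted(scene for scene, ha_effects in scenes_map.items()
--                   if any(e in effects for e in ha_effects))
-- ===== Notes on version B (the rewrite author's own statement) =====
-- stated objective: simpler
-- what changed: B transposes the traversal: it iterates scenes_map once as the outer (and only) pass, keeping a scene iff any of its HA effects lies in a prebuilt set of the entity's effects, so A's dedup accumulator set keyed off the effect loop disappears entirely; the Lean Pre_ only excludes association lists with duplicate scene keys, which cannot arise from a Python dict.
import Mathlib
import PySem

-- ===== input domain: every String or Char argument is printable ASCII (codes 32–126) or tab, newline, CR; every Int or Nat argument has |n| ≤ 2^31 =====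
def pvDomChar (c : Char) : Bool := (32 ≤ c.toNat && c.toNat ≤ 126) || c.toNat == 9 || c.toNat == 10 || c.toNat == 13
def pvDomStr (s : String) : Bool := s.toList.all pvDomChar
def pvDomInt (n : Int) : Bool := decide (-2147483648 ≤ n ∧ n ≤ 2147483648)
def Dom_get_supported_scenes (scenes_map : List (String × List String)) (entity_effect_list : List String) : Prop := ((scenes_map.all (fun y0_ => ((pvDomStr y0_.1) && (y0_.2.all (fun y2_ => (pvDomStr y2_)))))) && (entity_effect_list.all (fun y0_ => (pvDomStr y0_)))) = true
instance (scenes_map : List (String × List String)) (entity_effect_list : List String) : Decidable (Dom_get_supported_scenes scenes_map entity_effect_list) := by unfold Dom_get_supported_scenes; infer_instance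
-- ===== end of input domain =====

-- ===== PORT A =====
-- A: for each effect, scan scenes_map and add matching scene keys to a set; return sorted(set).
def get_supported_scenes (scenes_map : List (String × List String)) (entity_effect_list : List String) : List String :=
  let yandex_scenes : PySem.Set String :=
    entity_effect_list.foldl (fun ys effect =>
      scenes_map.foldl (fun ys p =>
        if p.2.contains effect then PySem.Set.add ys p.1 else ys) ys) PySem.Set.empty
  PySem.List.sorted yandex_scenes (fun x => x) false

-- ===== PORT B =====
-- B: build the set of effects once, then a single filtering pass over scenes_map; no dedup accumulator.
def get_supported_scenes_alt (scenes_map : List (String × List String)) (entity_effect_list : List String) : List String :=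
  let effects : PySem.Set String := PySem.Set.ofList entity_effect_list
  PySem.List.sorted
    ((scenes_map.filter (fun p => p.2.any (fun e => PySem.Set.contains effects e))).map Prod.fst)
    (fun x => x) false

-- ===== PRECONDITION & SPEC =====
-- Pre_ excludes association lists with duplicate scene keys: they cannot arise from a Python
-- dict (A's input type), and on them A's set dedups while B keeps each occurrence.
def Pre_get_supported_scenes (scenes_map : List (String × List String)) (entity_effect_list : List String) : Prop :=
  (scenes_map.map Prod.fst).Nodup
instance (scenes_map : List (String × List String)) (entity_effect_list : List String) : Decidable (Pre_get_supported_scenes scenes_map entity_effect_list) := by unfold Pre_get_supported_scenes; infer_instance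
def pvWitness_get_supported_scenes : (List (String × List String)) × List String :=
  ([("sunset", ["red", "warm"]), ("party", ["disco"])], ["warm", "blue"])
def Spec_get_supported_scenes (scenes_map : List (String × List String)) (entity_effect_list : List String) (out : List String) : Prop := out = get_supported_scenes_alt scenes_map entity_effect_list
instance (scenes_map : List (String × List String)) (entity_effect_list : List String) (out : List String) : Decidable (Spec_get_supported_scenes scenes_map entity_effect_list out) := by unfold Spec_get_supported_scenes; infer_instance

-- ===== CLAIM (what is proved, stated in full; the proofs are below) =====
def Claim_equal_get_supported_scenes : Prop := ∀ (scenes_map : List (String × List String)) (entity_effect_list : List String), Dom_get_supported_scenes scenes_map entity_effect_list → Pre_get_supported_scenes scenes_map entity_effect_list → Spec_get_supported_scenes scenes_map entity_effect_list (get_supported_scenes scenes_map entity_effect_list)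

-- ===== LEMMAS AND PROOFS =====

-- membership in A's inner fold over scenes_map
theorem mem_inner_fold (sm : List (String × List String)) (e : String)
    (ys : PySem.Set String) (x : String) :
    x ∈ sm.foldl (fun ys p => if p.2.contains e then PySem.Set.add ys p.1 else ys) ys ↔
      x ∈ ys ∨ ∃ p ∈ sm, p.2.contains e ∧ x = p.1 := by
  induction sm generalizing ys with
  | nil => simp
  | cons q t ih =>
    simp only [List.foldl_cons]
    rw [ih]
    by_cases h : q.2.contains e
    · rw [if_pos h, PySem.Set.mem_add]
      constructor
      · rintro ((hx | rfl) | ⟨p, hp, hP⟩)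
        · exact Or.inl hx
        · exact Or.inr ⟨q, List.mem_cons_self, h, rfl⟩
        · exact Or.inr ⟨p, List.mem_cons_of_mem _ hp, hP⟩
      · rintro (hx | ⟨p, hp, hP⟩)
        · exact Or.inl (Or.inl hx)
        · rcases List.mem_cons.mp hp with rfl | hp
          · exact Or.inl (Or.inr hP.2)
          · exact Or.inr ⟨p, hp, hP⟩
    · rw [if_neg h]
      constructor
      · rintro (hx | ⟨p, hp, hP⟩)
        · exact Or.inl hx
        · exact Or.inr ⟨p, List.mem_cons_of_mem _ hp, hP⟩
      · rintro (hx | ⟨p, hp, hP⟩)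
        · exact Or.inl hx
        · rcases List.mem_cons.mp hp with rfl | hp
          · exact absurd hP.1 h
          · exact Or.inr ⟨p, hp, hP⟩

theorem nodup_inner_fold (sm : List (String × List String)) (e : String)
    (ys : PySem.Set String) (h : ys.Nodup) :
    (sm.foldl (fun ys p => if p.2.contains e then PySem.Set.add ys p.1 else ys) ys).Nodup := by
  induction sm generalizing ys with
  | nil => exact h
  | cons q t ih =>
    simp only [List.foldl_cons]
    by_cases hq : q.2.contains e
    · rw [if_pos hq]
      exact ih _ (PySem.Set.nodup_add _ _ h)
    · rw [if_neg hq]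
      exact ih _ h

-- membership in A's outer fold over the effects
theorem mem_outer_fold (sm : List (String × List String)) (el : List String)
    (ys : PySem.Set String) (x : String) :
    x ∈ el.foldl (fun ys e =>
        sm.foldl (fun ys p => if p.2.contains e then PySem.Set.add ys p.1 else ys) ys) ys ↔
      x ∈ ys ∨ ∃ e ∈ el, ∃ p ∈ sm, p.2.contains e ∧ x = p.1 := by
  induction el generalizing ys with
  | nil => simp
  | cons e t ih =>
    simp only [List.foldl_cons, ih, mem_inner_fold]
    constructor
    · rintro (⟨h | h⟩ | h)
      · exact Or.inl h
      · exact Or.inr ⟨e, by simp, h⟩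
      · obtain ⟨e', he', hp⟩ := h
        exact Or.inr ⟨e', by simp [he'], hp⟩
    · rintro (h | ⟨e', he', hp⟩)
      · exact Or.inl (Or.inl h)
      · rcases List.mem_cons.mp he' with rfl | he'
        · exact Or.inl (Or.inr hp)
        · exact Or.inr ⟨e', he', hp⟩

theorem nodup_outer_fold (sm : List (String × List String)) (el : List String)
    (ys : PySem.Set String) (h : ys.Nodup) :
    (el.foldl (fun ys e =>
        sm.foldl (fun ys p => if p.2.contains e then PySem.Set.add ys p.1 else ys) ys) ys).Nodup := by
  induction el generalizing ys with
  | nil => exact h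
  | cons e t ih =>
    simp only [List.foldl_cons]
    exact ih _ (nodup_inner_fold sm e ys h)

-- ===== VERDICT (by name: the statement is the Claim_ definition above) =====
theorem get_supported_scenes_spec : Claim_equal_get_supported_scenes := by
  intro sm el _ hpre
  unfold Spec_get_supported_scenes get_supported_scenes get_supported_scenes_alt
  apply (PySem.List.sorted_id_eq_sorted_id_iff_perm _ _).mpr
  have hA : (el.foldl (fun ys e =>
      sm.foldl (fun ys p => if p.2.contains e then PySem.Set.add ys p.1 else ys) ys)
      PySem.Set.empty).Nodup := nodup_outer_fold sm el _ (by simp [PySem.Set.empty])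
  have hB : ((sm.filter (fun p => p.2.any (fun e => PySem.Set.contains (PySem.Set.ofList el) e))).map Prod.fst).Nodup := by
    exact hpre.sublist (List.Sublist.map Prod.fst List.filter_sublist)
  refine (List.perm_ext_iff_of_nodup hA hB).mpr ?_
  intro x
  rw [mem_outer_fold]
  simp only [PySem.Set.empty, List.not_mem_nil, false_or, List.mem_map, List.mem_filter]
  constructor
  · rintro ⟨e, he, p, hp, hc, rfl⟩
    refine ⟨p, ⟨hp, ?_⟩, rfl⟩
    simp only [List.any_eq_true]
    exact ⟨e, List.contains_iff_mem.mp hc, by simpa [PySem.Set.contains_iff, PySem.Set.mem_ofList] using he⟩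
  · rintro ⟨p, ⟨hp, hany⟩, rfl⟩
    simp only [List.any_eq_true] at hany
    obtain ⟨e, he, hc⟩ := hany
    refine ⟨e, ?_, p, hp, List.contains_iff_mem.mpr he, rfl⟩
    simpa [PySem.Set.contains_iff, PySem.Set.mem_ofList] using hc
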